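-- pv_equiv track=rewrite | github.com/toroleapinc/encephagen | experiments/19_learn_to_calibrate.py | classify_regions
-- ===== SOURCE A (Python) =====
-- def classify_regions(labels):
--     groups = {}
--     for key, patterns in [
--         ('visual', ['V1', 'V2', 'VAC']),
--         ('somatosensory', ['S1', 'S2']),
--         ('prefrontal', ['PFC', 'FEF']),
--         ('hippocampus', ['HC', 'PHC']),
--         ('amygdala', ['AMYG']),
--         ('basal_ganglia', ['BG']),
--         ('thalamus', ['TM']),
--         ('motor', ['M1', 'PMC']),
--         ('cingulate', ['CC']),
--     ]:
--         groups[key] = [i for i, l in enumerate(labels)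
--                        if any(p in l.upper() for p in patterns)]
--     return groups
-- ===== SOURCE B (Python) =====
-- # B: multi-pattern matching via a substring index — for each label, enumerate all
-- # substrings of lengths 2..4 of its uppercase form and look them up in a
-- # pattern->category dict; no per-pattern `in` scans at all.
-- PATTERN_TO_KEY = {
--     'V1': 'visual', 'V2': 'visual', 'VAC': 'visual',
--     'S1': 'somatosensory', 'S2': 'somatosensory',
--     'PFC': 'prefrontal', 'FEF': 'prefrontal',
--     'HC': 'hippocampus', 'PHC': 'hippocampus',
--     'AMYG': 'amygdala',
--     'BG': 'basal_ganglia',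
--     'TM': 'thalamus',
--     'M1': 'motor', 'PMC': 'motor',
--     'CC': 'cingulate',
-- }
-- KEYS = ['visual', 'somatosensory', 'prefrontal', 'hippocampus', 'amygdala',
--         'basal_ganglia', 'thalamus', 'motor', 'cingulate']
--
-- def classify_regions(labels):
--     groups = {k: [] for k in KEYS}
--     for i, l in enumerate(labels):
--         u = l.upper()
--         hit = set()
--         for L in (2, 3, 4):
--             for j in range(len(u) - L + 1):
--                 k = PATTERN_TO_KEY.get(u[j:j+L])
--                 if k is not None:
--                     hit.add(k)
--         for k in KEYS:
--             if k in hit: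
--                 groups[k].append(i)
--     return groups
-- ===== Notes on version B (the rewrite author's own statement) =====
-- stated objective: faster
-- what changed: B replaces A's per-category substring scans (any(p in l.upper()) over 15 patterns for each of 9 categories) with a precomputed pattern->category dict: one pass over the labels that enumerates every substring of length 2-4 of the uppercased label, looks it up in the index, and collects the hit categories in a set.
import Mathlib
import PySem

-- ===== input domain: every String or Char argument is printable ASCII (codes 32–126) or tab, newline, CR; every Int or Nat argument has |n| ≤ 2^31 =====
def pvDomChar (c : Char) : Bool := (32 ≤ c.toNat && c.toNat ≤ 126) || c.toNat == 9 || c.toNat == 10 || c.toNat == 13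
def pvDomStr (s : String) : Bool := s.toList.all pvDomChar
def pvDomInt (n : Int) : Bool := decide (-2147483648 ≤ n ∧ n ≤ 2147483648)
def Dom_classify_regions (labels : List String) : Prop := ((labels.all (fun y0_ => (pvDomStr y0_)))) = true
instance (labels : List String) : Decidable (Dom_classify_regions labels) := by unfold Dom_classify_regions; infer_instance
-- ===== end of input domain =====

set_option maxHeartbeats 1000000


-- B matches labels against a precomputed pattern→category index by enumerating each label's substrings of length 2–4 (one pass over the labels), instead of A's nine per-category `any(p in l.upper())` scans; same return value, proved below.

-- ===== PORT A =====
-- A: for each (key, patterns) in the literal table, groups[key] =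
-- [i for i, l in enumerate(labels) if any(p in l.upper() for p in patterns)].
def classify_regions (labels : List String) : List (String × List Int) :=
  (([ ("visual", ["V1", "V2", "VAC"]),
      ("somatosensory", ["S1", "S2"]),
      ("prefrontal", ["PFC", "FEF"]),
      ("hippocampus", ["HC", "PHC"]),
      ("amygdala", ["AMYG"]),
      ("basal_ganglia", ["BG"]),
      ("thalamus", ["TM"]),
      ("motor", ["M1", "PMC"]),
      ("cingulate", ["CC"]) ] : List (String × List String)).foldl
    (fun groups kp =>
      groups.insert kp.1
        (((PySem.List.enumerate labels).filter
            (fun il => kp.2.any (fun p => PySem.Str.isIn p (PySem.Str.upper il.2)))).map (·.1)))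
    PySem.Dict.empty).items

-- ===== PORT B =====
-- PATTERN_TO_KEY dict literal of Source B
def patPairs : List (String × String) :=
  [ ("V1", "visual"), ("V2", "visual"), ("VAC", "visual"),
    ("S1", "somatosensory"), ("S2", "somatosensory"),
    ("PFC", "prefrontal"), ("FEF", "prefrontal"),
    ("HC", "hippocampus"), ("PHC", "hippocampus"),
    ("AMYG", "amygdala"),
    ("BG", "basal_ganglia"),
    ("TM", "thalamus"),
    ("M1", "motor"), ("PMC", "motor"),
    ("CC", "cingulate") ]

def patIdx : PySem.Dict String String := PySem.Dict.mk patPairs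

-- KEYS of Source B
def keysB : List String :=
  [ "visual", "somatosensory", "prefrontal", "hippocampus", "amygdala",
    "basal_ganglia", "thalamus", "motor", "cingulate" ]

-- the inner `hit` set of Source B: for L in (2,3,4), for j in range(len(u)-L+1),
-- look u[j:j+L] up in PATTERN_TO_KEY and add the category on a hit.
def pvAddHit (hit : PySem.Set String) (s : String) : PySem.Set String :=
  match patIdx.get? s with
  | some k => PySem.Set.add hit k
  | none => hit

def pvPass (u : String) (L : Int) (hit : PySem.Set String) : PySem.Set String :=
  (PySem.List.pyRange 0 (PySem.Str.len u - L + 1) 1).foldl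
    (fun hit j => pvAddHit hit (PySem.Str.slice u (some j) (some (j + L)))) hit

def pvHit (u : String) : PySem.Set String :=
  ([2, 3, 4] : List Int).foldl (fun hit L => pvPass u L hit) PySem.Set.empty

-- B: pre-initialize all nine keys to [], then one pass over enumerate(labels):
-- uppercase once, compute the hit set by substring lookups, append the index
-- to every category in the hit set.
def classify_regions_alt (labels : List String) : List (String × List Int) :=
  ((PySem.List.enumerate labels).foldl
    (fun groups il =>
      let hit := pvHit (PySem.Str.upper il.2)
      keysB.foldl
        (fun groups k =>
          if PySem.Set.contains hit k then groups.modify k [] (· ++ [il.1]) else groups)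
        groups)
    (keysB.foldl (fun groups k => groups.insert k ([] : List Int)) PySem.Dict.empty)).items

-- ===== PRECONDITION & SPEC =====
def Spec_classify_regions (labels : List String) (out : List (String × List Int)) : Prop := out = classify_regions_alt labels
instance (labels : List String) (out : List (String × List Int)) : Decidable (Spec_classify_regions labels out) := by unfold Spec_classify_regions; infer_instance

-- ===== CLAIM (what is proved, stated in full; the proofs are below) =====
def Claim_equal_classify_regions : Prop := ∀ (labels : List String), Dom_classify_regions labels → Spec_classify_regions labels (classify_regions labels)

-- ===== LEMMAS AND PROOFS =====

-- does label l match the pattern list ps (after uppercasing), as A tests it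
def pvMatch (ps : List String) (l : String) : Bool :=
  ps.any (fun p => PySem.Str.isIn p (PySem.Str.upper l))

-- indices among the enumerated pairs es whose label matches ps
def pvSel (ps : List String) (es : List (Int × String)) : List Int :=
  (es.filter (fun il => pvMatch ps il.2)).map (·.1)

-- the nine-entry dict with the literal keys and the given group values
def pvD9 (a1 a2 a3 a4 a5 a6 a7 a8 a9 : List Int) : PySem.Dict String (List Int) :=
  PySem.Dict.mk
    [ ("visual", a1), ("somatosensory", a2), ("prefrontal", a3), ("hippocampus", a4),
      ("amygdala", a5), ("basal_ganglia", a6), ("thalamus", a7), ("motor", a8), ("cingulate", a9) ]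

-- B's per-label step: the inner foldl over keysB applied to one enumerated pair
def pvStep (il : Int × String) (d : PySem.Dict String (List Int)) : PySem.Dict String (List Int) :=
  keysB.foldl
    (fun groups k =>
      if PySem.Set.contains (pvHit (PySem.Str.upper il.2)) k then
        groups.modify k [] (· ++ [il.1])
      else groups)
    d

-- membership in one range pass that adds the looked-up category on a hit
lemma mem_foldl_hit {α : Type} (f : α → String) (js : List α)
    (s0 : PySem.Set String) (x : String) :
    x ∈ js.foldl (fun s j => pvAddHit s (f j)) s0 ↔
      x ∈ s0 ∨ ∃ j ∈ js, patIdx.get? (f j) = some x := by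
  induction js generalizing s0 with
  | nil => simp
  | cons j js ih =>
    simp only [List.foldl_cons, List.mem_cons]
    rw [ih]
    simp only [pvAddHit]
    cases hg : patIdx.get? (f j) with
    | none =>
      constructor
      · rintro (h | ⟨a, ha, hx⟩)
        · exact Or.inl h
        · exact Or.inr ⟨a, Or.inr ha, hx⟩
      · rintro (h | ⟨a, (rfl | ha), hx⟩)
        · exact Or.inl h
        · rw [hg] at hx; cases hx
        · exact Or.inr ⟨a, ha, hx⟩
    | some k =>
      rw [PySem.Set.mem_add]
      constructor
      · rintro ((h | rfl) | ⟨a, ha, hx⟩)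
        · exact Or.inl h
        · exact Or.inr ⟨j, Or.inl rfl, hg⟩
        · exact Or.inr ⟨a, Or.inr ha, hx⟩
      · rintro (h | ⟨a, (rfl | ha), hx⟩)
        · exact Or.inl (Or.inl h)
        · rw [hg] at hx
          injection hx with h
          exact Or.inl (Or.inr h.symm)
        · exact Or.inr ⟨a, ha, hx⟩

lemma mem_pvPass (u : String) (L : Int) (s0 : PySem.Set String) (x : String) :
    x ∈ pvPass u L s0 ↔ x ∈ s0 ∨
      ∃ j ∈ PySem.List.pyRange 0 (PySem.Str.len u - L + 1) 1,
        patIdx.get? (PySem.Str.slice u (some j) (some (j + L))) = some x := by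
  unfold pvPass
  exact mem_foldl_hit (fun j => PySem.Str.slice u (some j) (some (j + L))) _ s0 x

-- membership in the hit set, unfolded to the three substring-length passes
lemma mem_pvHit (u : String) (k : String) :
    k ∈ pvHit u ↔ ∃ L : Int, (L = 2 ∨ L = 3 ∨ L = 4) ∧
      ∃ j ∈ PySem.List.pyRange 0 (PySem.Str.len u - L + 1) 1,
        patIdx.get? (PySem.Str.slice u (some j) (some (j + L))) = some k := by
  have h : pvHit u = pvPass u 4 (pvPass u 3 (pvPass u 2 PySem.Set.empty)) := rfl
  rw [h, mem_pvPass, mem_pvPass, mem_pvPass]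
  constructor
  · rintro (((h | h) | h) | h)
    · cases h
    · exact ⟨2, by tauto, h⟩
    · exact ⟨3, by tauto, h⟩
    · exact ⟨4, by tauto, h⟩
  · rintro ⟨L, (rfl | rfl | rfl), h⟩
    · exact Or.inl (Or.inl (Or.inr h))
    · exact Or.inl (Or.inr h)
    · exact Or.inr h

-- a slice taken at an in-range start with in-range extent has exactly length L
lemma slice_length_forced (cs s : List Char) (L j : Int) (hL : 0 ≤ L)
    (hj0 : 0 ≤ j) (hjlt : j < (cs.length : Int) - L + 1)
    (hs : PySem.List.slice cs (some j) (some (j + L)) = s) :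
    (s.length : Int) = L := by
  rw [PySem.List.slice_toNat cs hj0 (by omega)] at hs
  have hlen := congrArg List.length hs
  simp only [List.length_take, List.length_drop] at hlen
  omega

-- substring of length |p| at some in-range offset ⟺ Python's `p in cs`
lemma exists_slice_iff_isIn (cs ps : List Char) (hps : ps ≠ []) :
    (∃ j : Int, (0 ≤ j ∧ j < (cs.length : Int) - ps.length + 1) ∧
        PySem.List.slice cs (some j) (some (j + ps.length)) = ps) ↔
      PySem.Chars.isIn ps cs = true := by
  rw [← PySem.Chars.exists_prefix_drop_iff_isIn]
  constructor
  · rintro ⟨j, ⟨hj0, hjlt⟩, hs⟩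
    rw [PySem.List.slice_toNat cs hj0 (by omega)] at hs
    rw [show ((j + (ps.length : Int)).toNat - j.toNat) = ps.length by omega] at hs
    exact ⟨j.toNat, List.prefix_iff_eq_take.mpr hs.symm⟩
  · rintro ⟨jn, hpre⟩
    have hlen : ps.length ≤ cs.length - jn := by
      have := hpre.length_le
      simpa using this
    have hjn : jn + ps.length ≤ cs.length := by
      rcases Nat.lt_or_ge jn cs.length with h | h
      · omega
      · exfalso
        have hd : cs.drop jn = [] := List.drop_eq_nil_of_le h
        rw [hd] at hpre
        exact hps (List.prefix_nil.mp hpre)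
    refine ⟨(jn : Int), ⟨Int.natCast_nonneg jn, by omega⟩, ?_⟩
    rw [PySem.List.slice_toNat cs (Int.natCast_nonneg jn) (by positivity)]
    rw [show (((jn : Int) + (ps.length : Int)).toNat - ((jn : Int)).toNat) = ps.length by omega,
        Int.toNat_natCast]
    exact (List.prefix_iff_eq_take.mp hpre).symm

-- first-match lookup in an association-list dict yields a stored pair
lemma get?_mem {κ ν : Type} [BEq κ] [LawfulBEq κ] (l : List (κ × ν)) (s : κ) (k : ν)
    (h : (PySem.Dict.mk l).get? s = some k) : (s, k) ∈ l := by
  induction l with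
  | nil => simp [PySem.Dict.get?] at h
  | cons kv rest ih =>
    obtain ⟨a, b⟩ := kv
    rw [PySem.Dict.get?_mk_cons] at h
    by_cases hc : (a == s) = true
    · rw [if_pos hc] at h
      injection h with h
      rw [← eq_of_beq hc, ← h]
      exact List.mem_cons_self
    · rw [if_neg hc] at h
      exact List.mem_cons_of_mem _ (ih h)

-- every stored pattern looks up to its category (keys of patPairs are distinct)
lemma mem_get?_patIdx {p k : String} (h : (p, k) ∈ patPairs) : patIdx.get? p = some k := by
  fin_cases h <;> decide

-- the hit set holds exactly the categories one of whose patterns occurs in u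
lemma mem_pvHit_iff (u : String) (k : String) :
    k ∈ pvHit u ↔ ∃ p : String, (p, k) ∈ patPairs ∧ PySem.Str.isIn p u = true := by
  rw [mem_pvHit]
  constructor
  · rintro ⟨L, hL, j, hj, hget⟩
    rw [PySem.List.mem_pyRange_one, PySem.Str.len_eq] at hj
    refine ⟨PySem.Str.slice u (some j) (some (j + L)), get?_mem patPairs _ _ hget, ?_⟩
    have hL0 : (0 : Int) ≤ L := by rcases hL with rfl | rfl | rfl <;> norm_num
    have hlen : ((PySem.Str.slice u (some j) (some (j + L))).toList.length : Int) = L := by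
      apply slice_length_forced u.toList _ L j hL0 hj.1 hj.2
      simp [PySem.Str.toList_slice]
    rw [PySem.Str.isIn_eq]
    apply (exists_slice_iff_isIn u.toList _ ?_).mp
    · exact ⟨j, by constructor <;> [exact hj.1; omega], by rw [hlen]; simp [PySem.Str.toList_slice]⟩
    · intro hnil
      rw [hnil] at hlen
      simp at hlen
      rcases hL with rfl | rfl | rfl <;> omega
  · rintro ⟨p, hp, hin⟩
    have hplen : p.toList.length = 2 ∨ p.toList.length = 3 ∨ p.toList.length = 4 := by
      fin_cases hp <;> decide
    have hpnil : p.toList ≠ [] := by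
      intro h; rw [h] at hplen; simp at hplen
    rw [PySem.Str.isIn_eq] at hin
    obtain ⟨j, hj, hs⟩ := (exists_slice_iff_isIn u.toList p.toList hpnil).mpr hin
    refine ⟨(p.toList.length : Int), by exact_mod_cast hplen, j, ?_, ?_⟩
    · rw [PySem.List.mem_pyRange_one, PySem.Str.len_eq]
      exact hj
    · have hsl : PySem.Str.slice u (some j) (some (j + (p.toList.length : Int))) = p := by
        apply String.toList_injective
        rw [PySem.Str.toList_slice]
        simpa using hs
      rw [hsl]
      exact mem_get?_patIdx hp

-- per-category: the contains test of B equals the any-pattern test of A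
lemma contains_hit_eq (l : String) (k : String) (ps : List String)
    (hk : ∀ p : String, (p, k) ∈ patPairs ↔ p ∈ ps) :
    PySem.Set.contains (pvHit (PySem.Str.upper l)) k = pvMatch ps l := by
  rcases hb : pvMatch ps l with _ | _
  · rw [← Bool.not_eq_true]
    intro hc
    have hm := (PySem.Set.contains_iff _ _).mp hc
    obtain ⟨p, hp, hin⟩ := (mem_pvHit_iff _ _).mp hm
    have hT : pvMatch ps l = true := by
      simp only [pvMatch, List.any_eq_true]
      exact ⟨p, (hk p).mp hp, hin⟩
    rw [hb] at hT; cases hT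
  · apply (PySem.Set.contains_iff _ _).mpr
    apply (mem_pvHit_iff _ _).mpr
    simp only [pvMatch, List.any_eq_true] at hb
    obtain ⟨p, hp, hin⟩ := hb
    exact ⟨p, (hk p).mpr hp, hin⟩

lemma pvSlot1 (c : Bool) (i : Int) (a1 a2 a3 a4 a5 a6 a7 a8 a9 : List Int) :
    (if c then (pvD9 a1 a2 a3 a4 a5 a6 a7 a8 a9).modify "visual" [] (· ++ [i]) else pvD9 a1 a2 a3 a4 a5 a6 a7 a8 a9) =
      pvD9 (if c then a1 ++ [i] else a1) a2 a3 a4 a5 a6 a7 a8 a9 := by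
  cases c
  · rfl
  · simp [pvD9, PySem.Dict.modify, PySem.Dict.insert, PySem.Dict.contains, PySem.Dict.get?, PySem.Dict.getD]

lemma pvSlot2 (c : Bool) (i : Int) (a1 a2 a3 a4 a5 a6 a7 a8 a9 : List Int) :
    (if c then (pvD9 a1 a2 a3 a4 a5 a6 a7 a8 a9).modify "somatosensory" [] (· ++ [i]) else pvD9 a1 a2 a3 a4 a5 a6 a7 a8 a9) =
      pvD9 a1 (if c then a2 ++ [i] else a2) a3 a4 a5 a6 a7 a8 a9 := by
  cases c
  · rfl
  · simp [pvD9, PySem.Dict.modify, PySem.Dict.insert, PySem.Dict.contains, PySem.Dict.get?, PySem.Dict.getD]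

lemma pvSlot3 (c : Bool) (i : Int) (a1 a2 a3 a4 a5 a6 a7 a8 a9 : List Int) :
    (if c then (pvD9 a1 a2 a3 a4 a5 a6 a7 a8 a9).modify "prefrontal" [] (· ++ [i]) else pvD9 a1 a2 a3 a4 a5 a6 a7 a8 a9) =
      pvD9 a1 a2 (if c then a3 ++ [i] else a3) a4 a5 a6 a7 a8 a9 := by
  cases c
  · rfl
  · simp [pvD9, PySem.Dict.modify, PySem.Dict.insert, PySem.Dict.contains, PySem.Dict.get?, PySem.Dict.getD]

lemma pvSlot4 (c : Bool) (i : Int) (a1 a2 a3 a4 a5 a6 a7 a8 a9 : List Int) :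
    (if c then (pvD9 a1 a2 a3 a4 a5 a6 a7 a8 a9).modify "hippocampus" [] (· ++ [i]) else pvD9 a1 a2 a3 a4 a5 a6 a7 a8 a9) =
      pvD9 a1 a2 a3 (if c then a4 ++ [i] else a4) a5 a6 a7 a8 a9 := by
  cases c
  · rfl
  · simp [pvD9, PySem.Dict.modify, PySem.Dict.insert, PySem.Dict.contains, PySem.Dict.get?, PySem.Dict.getD]

lemma pvSlot5 (c : Bool) (i : Int) (a1 a2 a3 a4 a5 a6 a7 a8 a9 : List Int) :
    (if c then (pvD9 a1 a2 a3 a4 a5 a6 a7 a8 a9).modify "amygdala" [] (· ++ [i]) else pvD9 a1 a2 a3 a4 a5 a6 a7 a8 a9) =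
      pvD9 a1 a2 a3 a4 (if c then a5 ++ [i] else a5) a6 a7 a8 a9 := by
  cases c
  · rfl
  · simp [pvD9, PySem.Dict.modify, PySem.Dict.insert, PySem.Dict.contains, PySem.Dict.get?, PySem.Dict.getD]

lemma pvSlot6 (c : Bool) (i : Int) (a1 a2 a3 a4 a5 a6 a7 a8 a9 : List Int) :
    (if c then (pvD9 a1 a2 a3 a4 a5 a6 a7 a8 a9).modify "basal_ganglia" [] (· ++ [i]) else pvD9 a1 a2 a3 a4 a5 a6 a7 a8 a9) =
      pvD9 a1 a2 a3 a4 a5 (if c then a6 ++ [i] else a6) a7 a8 a9 := by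
  cases c
  · rfl
  · simp [pvD9, PySem.Dict.modify, PySem.Dict.insert, PySem.Dict.contains, PySem.Dict.get?, PySem.Dict.getD]

lemma pvSlot7 (c : Bool) (i : Int) (a1 a2 a3 a4 a5 a6 a7 a8 a9 : List Int) :
    (if c then (pvD9 a1 a2 a3 a4 a5 a6 a7 a8 a9).modify "thalamus" [] (· ++ [i]) else pvD9 a1 a2 a3 a4 a5 a6 a7 a8 a9) =
      pvD9 a1 a2 a3 a4 a5 a6 (if c then a7 ++ [i] else a7) a8 a9 := by
  cases c
  · rfl
  · simp [pvD9, PySem.Dict.modify, PySem.Dict.insert, PySem.Dict.contains, PySem.Dict.get?, PySem.Dict.getD]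

lemma pvSlot8 (c : Bool) (i : Int) (a1 a2 a3 a4 a5 a6 a7 a8 a9 : List Int) :
    (if c then (pvD9 a1 a2 a3 a4 a5 a6 a7 a8 a9).modify "motor" [] (· ++ [i]) else pvD9 a1 a2 a3 a4 a5 a6 a7 a8 a9) =
      pvD9 a1 a2 a3 a4 a5 a6 a7 (if c then a8 ++ [i] else a8) a9 := by
  cases c
  · rfl
  · simp [pvD9, PySem.Dict.modify, PySem.Dict.insert, PySem.Dict.contains, PySem.Dict.get?, PySem.Dict.getD]

lemma pvSlot9 (c : Bool) (i : Int) (a1 a2 a3 a4 a5 a6 a7 a8 a9 : List Int) :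
    (if c then (pvD9 a1 a2 a3 a4 a5 a6 a7 a8 a9).modify "cingulate" [] (· ++ [i]) else pvD9 a1 a2 a3 a4 a5 a6 a7 a8 a9) =
      pvD9 a1 a2 a3 a4 a5 a6 a7 a8 (if c then a9 ++ [i] else a9) := by
  cases c
  · rfl
  · simp [pvD9, PySem.Dict.modify, PySem.Dict.insert, PySem.Dict.contains, PySem.Dict.get?, PySem.Dict.getD]

lemma pvStep_eq (il : Int × String) (a1 a2 a3 a4 a5 a6 a7 a8 a9 : List Int) :
    pvStep il (pvD9 a1 a2 a3 a4 a5 a6 a7 a8 a9) =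
      pvD9 (if pvMatch ["V1", "V2", "VAC"] il.2 then a1 ++ [il.1] else a1)
           (if pvMatch ["S1", "S2"] il.2 then a2 ++ [il.1] else a2)
           (if pvMatch ["PFC", "FEF"] il.2 then a3 ++ [il.1] else a3)
           (if pvMatch ["HC", "PHC"] il.2 then a4 ++ [il.1] else a4)
           (if pvMatch ["AMYG"] il.2 then a5 ++ [il.1] else a5)
           (if pvMatch ["BG"] il.2 then a6 ++ [il.1] else a6)
           (if pvMatch ["TM"] il.2 then a7 ++ [il.1] else a7)
           (if pvMatch ["M1", "PMC"] il.2 then a8 ++ [il.1] else a8)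
           (if pvMatch ["CC"] il.2 then a9 ++ [il.1] else a9) := by
  have h1 := contains_hit_eq il.2 "visual" ["V1", "V2", "VAC"] (by intro p; simp [patPairs])
  have h2 := contains_hit_eq il.2 "somatosensory" ["S1", "S2"] (by intro p; simp [patPairs])
  have h3 := contains_hit_eq il.2 "prefrontal" ["PFC", "FEF"] (by intro p; simp [patPairs])
  have h4 := contains_hit_eq il.2 "hippocampus" ["HC", "PHC"] (by intro p; simp [patPairs])
  have h5 := contains_hit_eq il.2 "amygdala" ["AMYG"] (by intro p; simp [patPairs])
  have h6 := contains_hit_eq il.2 "basal_ganglia" ["BG"] (by intro p; simp [patPairs])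
  have h7 := contains_hit_eq il.2 "thalamus" ["TM"] (by intro p; simp [patPairs])
  have h8 := contains_hit_eq il.2 "motor" ["M1", "PMC"] (by intro p; simp [patPairs])
  have h9 := contains_hit_eq il.2 "cingulate" ["CC"] (by intro p; simp [patPairs])
  simp only [pvStep, keysB, List.foldl]
  rw [h1, h2, h3, h4, h5, h6, h7, h8, h9,
      pvSlot1, pvSlot2, pvSlot3, pvSlot4, pvSlot5, pvSlot6, pvSlot7, pvSlot8, pvSlot9]

lemma pvLoop_eq (es : List (Int × String)) :
    ∀ (a1 a2 a3 a4 a5 a6 a7 a8 a9 : List Int),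
    es.foldl (fun groups il => pvStep il groups) (pvD9 a1 a2 a3 a4 a5 a6 a7 a8 a9) =
      pvD9 (a1 ++ pvSel ["V1", "V2", "VAC"] es)
           (a2 ++ pvSel ["S1", "S2"] es)
           (a3 ++ pvSel ["PFC", "FEF"] es)
           (a4 ++ pvSel ["HC", "PHC"] es)
           (a5 ++ pvSel ["AMYG"] es)
           (a6 ++ pvSel ["BG"] es)
           (a7 ++ pvSel ["TM"] es)
           (a8 ++ pvSel ["M1", "PMC"] es)
           (a9 ++ pvSel ["CC"] es) := by
  induction es with
  | nil => intro a1 a2 a3 a4 a5 a6 a7 a8 a9; simp [pvSel]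
  | cons il es ih =>
    intro a1 a2 a3 a4 a5 a6 a7 a8 a9
    have hsel : ∀ (ps : List String) (a : List Int),
        (if pvMatch ps il.2 then a ++ [il.1] else a) ++ pvSel ps es = a ++ pvSel ps (il :: es) := by
      intro ps a
      by_cases h : pvMatch ps il.2 <;> simp [pvSel, h]
    rw [List.foldl_cons, pvStep_eq, ih,
        hsel, hsel, hsel, hsel, hsel, hsel, hsel, hsel, hsel]

lemma pvA_eq (labels : List String) :
    classify_regions labels =
      [ ("visual", pvSel ["V1", "V2", "VAC"] (PySem.List.enumerate labels)),
        ("somatosensory", pvSel ["S1", "S2"] (PySem.List.enumerate labels)),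
        ("prefrontal", pvSel ["PFC", "FEF"] (PySem.List.enumerate labels)),
        ("hippocampus", pvSel ["HC", "PHC"] (PySem.List.enumerate labels)),
        ("amygdala", pvSel ["AMYG"] (PySem.List.enumerate labels)),
        ("basal_ganglia", pvSel ["BG"] (PySem.List.enumerate labels)),
        ("thalamus", pvSel ["TM"] (PySem.List.enumerate labels)),
        ("motor", pvSel ["M1", "PMC"] (PySem.List.enumerate labels)),
        ("cingulate", pvSel ["CC"] (PySem.List.enumerate labels)) ] := by
  simp [classify_regions, pvSel, pvMatch, PySem.Dict.insert, PySem.Dict.contains,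
        PySem.Dict.empty, List.foldl]

-- ===== VERDICT (by name: the statement is the Claim_ definition above) =====
theorem classify_regions_spec : Claim_equal_classify_regions := by
  intro labels _
  show classify_regions labels = classify_regions_alt labels
  rw [pvA_eq]
  show _ = ((PySem.List.enumerate labels).foldl (fun groups il => pvStep il groups)
      (pvD9 [] [] [] [] [] [] [] [] [])).items
  rw [pvLoop_eq]
  simp [pvSel, pvD9]
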